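-- pv_equiv track=rewrite | github.com/carljohanrehn/flair | flair/datasets/biomedical.py | sentence_split_at_newline
-- ===== SOURCE A (Python) =====
-- from typing import Union, Callable, Dict, List, Tuple, Iterable
--
-- def sentence_split_at_newline(text: str) -> Tuple[List[str], List[int]]:
--     sentences = text.split("\n")
--     offsets = []
--     last_offset = 0
--     for sent in sentences:
--         offsets += [last_offset]
--         last_offset += len(sent) + 1
--
--     return sentences, offsets
-- ===== SOURCE B (Python) =====
-- def sentence_split_at_newline(text):
--     sentences = text.split("\n")
--     offsets = [0] + [i + 1 for i, c in enumerate(text) if c == "\n"]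
--     return sentences, offsets
-- ===== Notes on version B (the rewrite author's own statement) =====
-- stated objective: idiomatic
-- what changed: Offsets are read off directly from the newline positions in the raw text (0 plus i+1 for every newline index) instead of accumulating len(sentence)+1 over the split pieces.
import Mathlib
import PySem

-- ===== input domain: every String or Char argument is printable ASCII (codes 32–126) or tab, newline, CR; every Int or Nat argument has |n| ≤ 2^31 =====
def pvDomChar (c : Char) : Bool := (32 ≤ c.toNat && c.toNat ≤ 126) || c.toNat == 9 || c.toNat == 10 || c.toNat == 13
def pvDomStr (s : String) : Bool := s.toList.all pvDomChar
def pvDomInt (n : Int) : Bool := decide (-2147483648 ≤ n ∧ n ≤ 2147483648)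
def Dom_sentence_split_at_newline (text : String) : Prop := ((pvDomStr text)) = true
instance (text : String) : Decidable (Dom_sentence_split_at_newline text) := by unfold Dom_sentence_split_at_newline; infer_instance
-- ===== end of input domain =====

-- B computes the offsets directly from the newline positions of the raw text instead of
-- accumulating len(sentence)+1 over the split pieces (objective: idiomatic; return value only).

-- ===== PORT A =====
def sentence_split_at_newline (text : String) : List String × List Int :=
  let sentences := (PySem.Chars.splitOn text.toList ['\n']).map String.mk
  let r := sentences.foldl
    (fun (st : List Int × Int) sent => (st.1 ++ [st.2], st.2 + PySem.Str.len sent + 1))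
    ([], 0)
  (sentences, r.1)

-- ===== PORT B =====
def sentence_split_at_newline_alt (text : String) : List String × List Int :=
  let sentences := (PySem.Chars.splitOn text.toList ['\n']).map String.mk
  let offsets : List Int :=
    0 :: (PySem.List.enumerate text.toList 0).filterMap
      (fun ic => if ic.2 = '\n' then some (ic.1 + 1) else none)
  (sentences, offsets)

-- ===== PRECONDITION & SPEC =====
def Spec_sentence_split_at_newline (text : String) (out : List String × List Int) : Prop := out = sentence_split_at_newline_alt text
instance (text : String) (out : List String × List Int) : Decidable (Spec_sentence_split_at_newline text out) := by unfold Spec_sentence_split_at_newline; infer_instance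

-- ===== CLAIM (what is proved, stated in full; the proofs are below) =====
def Claim_equal_sentence_split_at_newline : Prop := ∀ (text : String), Dom_sentence_split_at_newline text → Spec_sentence_split_at_newline text (sentence_split_at_newline text)

-- ===== LEMMAS AND PROOFS =====

-- relative positions of '\n' in a character list
def nlPos : List Char → List Int
  | [] => []
  | c :: rest => if c = '\n' then 0 :: (nlPos rest).map (· + 1) else (nlPos rest).map (· + 1)

theorem modifyHead_nil_append {α : Type} (l : List (List α)) :
    l.modifyHead (fun x => [] ++ x) = l := by
  cases l <;> simp

theorem modifyHead_id' {α : Type} (l : List α) :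
    l.modifyHead (fun x => x) = l := by
  cases l <;> simp

theorem splitOn_go_eq (cs : List Char) (fuel : Nat) (h : cs.length ≤ fuel)
    (cur : List Char) (acc : List (List Char)) :
    PySem.Chars.splitOn.go ['\n'] fuel cs cur acc
      = acc.reverse ++ (List.splitOnP (· == '\n') cs).modifyHead (cur.reverse ++ ·) := by
  induction cs generalizing fuel cur acc with
  | nil =>
    cases fuel <;> simp [PySem.Chars.splitOn.go, List.splitOnP_nil]
  | cons c rest ih =>
    cases fuel with
    | zero => simp at h
    | succ f =>
      by_cases hc : c = '\n'
      · subst hc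
        simp only [PySem.Chars.splitOn.go, List.isPrefixOf, beq_self_eq_true, Bool.true_and,
          if_pos, List.length_cons, List.length_nil, List.drop_succ_cons, List.drop_zero]
        rw [ih f (by simpa using h) [] ((cur.reverse) :: acc)]
        simp [List.splitOnP_cons, modifyHead_id']
      · have hb : (['\n'].isPrefixOf (c :: rest)) = false := by
          simp [List.isPrefixOf]; exact fun h' => hc h'.symm
        simp only [PySem.Chars.splitOn.go, hb, Bool.false_eq_true, if_false]
        rw [ih f (by simpa using h) (c :: cur) acc]
        have hpc : (c == '\n') = false := by simpa using hc
        rw [List.splitOnP_cons, hpc]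
        simp only [Bool.false_eq_true, if_false, List.modifyHead_modifyHead]
        congr 2
        funext x
        simp

theorem splitOn_eq (cs : List Char) :
    PySem.Chars.splitOn cs ['\n'] = List.splitOnP (· == '\n') cs := by
  have := splitOn_go_eq cs (cs.length + 1) (by omega) [] []
  simpa [PySem.Chars.splitOn, modifyHead_id'] using this

theorem enumerate_filter_eq (cs : List Char) (s : Int) :
    (PySem.List.enumerate cs s).filterMap
        (fun ic => if ic.2 = '\n' then some (ic.1 + 1) else none)
      = (nlPos cs).map (fun i => s + i + 1) := by
  induction cs generalizing s with
  | nil => simp [PySem.List.enumerate_nil, nlPos]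
  | cons c rest ih =>
    rw [PySem.List.enumerate_cons]
    by_cases hc : c = '\n'
    · subst hc
      simp only [List.filterMap_cons, ih (s + 1)]
      simp only [nlPos, reduceIte, List.map_cons, List.map_map]
      congr 1
      · omega
      · apply List.map_congr_left; intro i _; simp; omega
    · simp only [List.filterMap_cons, if_neg hc, ih (s + 1)]
      simp only [nlPos, if_neg hc, List.map_map]
      apply List.map_congr_left; intro i _; simp; omega

theorem offsets_foldl (cs : List Char) (pre : List Char) (acc : List Int) (k : Int) :
    ((List.splitOnP (· == '\n') cs).modifyHead (pre ++ ·)).foldl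
        (fun (st : List Int × Int) (p : List Char) => (st.1 ++ [st.2], st.2 + (p.length : Int) + 1))
        (acc, k)
      = (acc ++ k :: (nlPos cs).map (fun i => k + pre.length + i + 1),
         k + pre.length + cs.length + 1) := by
  induction cs generalizing pre acc k with
  | nil => simp [List.splitOnP_nil, nlPos]
  | cons c rest ih =>
    by_cases hc : c = '\n'
    · subst hc
      rw [List.splitOnP_cons]
      simp only [beq_self_eq_true, if_pos, List.modifyHead_cons, List.foldl_cons]
      have := ih [] (acc ++ [k]) (k + pre.length + 1)
      rw [modifyHead_nil_append] at this
      simp only [List.length_nil, Int.natCast_zero, add_zero] at this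
      simp only [List.append_nil]
      rw [this]
      simp only [nlPos, if_pos rfl, reduceIte, List.map_cons, List.map_map, List.length_cons,
        Prod.mk.injEq]
      refine ⟨?_, by push_cast; ring⟩
      simp only [List.append_assoc, List.cons_append, List.nil_append]
      congr 1
      congr 1
      congr 1
      · omega
      · apply List.map_congr_left; intro i _; simp; omega
    · have hpc : (c == '\n') = false := by simpa using hc
      rw [List.splitOnP_cons, hpc]
      simp only [Bool.false_eq_true, if_false, List.modifyHead_modifyHead]
      have hcomp : ((fun x => pre ++ x) ∘ (List.cons c)) = fun x => (pre ++ [c]) ++ x := by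
        funext x; simp
      rw [hcomp, ih (pre ++ [c]) acc k]
      simp only [nlPos, if_neg hc, List.map_map, List.length_append, List.length_cons,
        List.length_nil, Prod.mk.injEq]
      refine ⟨?_, by push_cast; ring⟩
      congr 1
      congr 1
      apply List.map_congr_left; intro i _; simp; push_cast; omega

theorem len_mk (p : List Char) : PySem.Str.len (String.mk p) = (p.length : Int) := by
  have h : (String.mk p).toList = p := Eq.symm (String.ofList_eq.mp rfl)
  simp [PySem.Str.len, h]

-- ===== VERDICT (by name: the statement is the Claim_ definition above) =====
theorem sentence_split_at_newline_spec : Claim_equal_sentence_split_at_newline := by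
  intro text _
  unfold Spec_sentence_split_at_newline sentence_split_at_newline sentence_split_at_newline_alt
  simp only [splitOn_eq]
  refine Prod.ext rfl ?_
  have hfold :
      ((List.splitOnP (· == '\n') text.toList).map String.mk).foldl
          (fun (st : List Int × Int) sent => (st.1 ++ [st.2], st.2 + PySem.Str.len sent + 1))
          ([], 0)
        = ((List.splitOnP (· == '\n') text.toList).modifyHead (([] : List Char) ++ ·)).foldl
          (fun (st : List Int × Int) (p : List Char) => (st.1 ++ [st.2], st.2 + (p.length : Int) + 1))
          ([], 0) := by
    rw [modifyHead_nil_append, List.foldl_map]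
    congr 1
    funext st p
    rw [len_mk]
  simp only [hfold, offsets_foldl]
  rw [enumerate_filter_eq]
  simp
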